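-- pv_equiv track=rewrite | github.com/Ivan-JS-Nascimento/Atividades | lista 5/lista 5/L5Q01.py | contar_combinacoes
-- ===== SOURCE A (Python) =====
-- def contar_combinacoes(valor, notas, atual, todas):
--     if valor == 0: # quer dizer que nessa rota as combinacoes dao certo
--         todas.append(atual.copy())  # salva a combinação atual
--         return 1
--     if valor < 0 or notas == []:
--         return 0
--
--     # rota atual
--     atual.append(notas[0])
--     num1 = contar_combinacoes(valor - notas[0], notas, atual, todas)
--     atual.pop()
--
--     # pula para a proxima rota
--     num2 = contar_combinacoes(valor, notas[1:], atual, todas)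
--
--     return num1 + num2
-- ===== SOURCE B (Python) =====
-- def contar_combinacoes(valor, notas, atual, todas):
--     # Iterative stack-based DFS; same return value and same todas appends as A,
--     # and leaves atual unchanged (A restores it via append/pop).
--     count = 0
--     stack = [(valor, notas, [])]
--     while stack:
--         v, ns, ext = stack.pop()
--         if v == 0:
--             todas.append(atual + ext)
--             count += 1
--         elif v < 0 or not ns:
--             pass
--         else:
--             stack.append((v, ns[1:], ext))              # skip branch (explored second)
--             stack.append((v - ns[0], ns, ext + [ns[0]]))  # take branch (explored first)
--     return count
-- ===== Notes on version B (the rewrite author's own statement) =====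
-- stated objective: alternative
-- what changed: Replaces A's recursive take/skip DFS (with append/pop backtracking on atual) by an explicit stack of (remaining, notas, prefix) frames iterated in a single while loop, pushing the skip frame before the take frame to reproduce A's pre-order.
import Mathlib
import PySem

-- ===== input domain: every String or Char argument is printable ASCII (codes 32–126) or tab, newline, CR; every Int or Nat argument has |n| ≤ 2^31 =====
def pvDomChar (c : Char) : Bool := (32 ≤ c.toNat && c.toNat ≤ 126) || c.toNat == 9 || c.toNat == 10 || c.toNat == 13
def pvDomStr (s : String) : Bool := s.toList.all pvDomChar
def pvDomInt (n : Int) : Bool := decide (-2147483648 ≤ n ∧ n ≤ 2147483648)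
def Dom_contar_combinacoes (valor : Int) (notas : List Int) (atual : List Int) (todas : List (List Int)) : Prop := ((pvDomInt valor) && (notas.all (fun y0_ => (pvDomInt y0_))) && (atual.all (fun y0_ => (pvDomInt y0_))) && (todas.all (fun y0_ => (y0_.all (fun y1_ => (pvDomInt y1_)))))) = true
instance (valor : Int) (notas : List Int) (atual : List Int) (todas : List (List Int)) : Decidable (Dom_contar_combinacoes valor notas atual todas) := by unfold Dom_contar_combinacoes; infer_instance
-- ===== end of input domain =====

-- A mutates `atual`/`todas` in place and restores `atual`; the claim here is about the
-- RETURN value (the combination count) only.  B is an explicit-stack iterative DFS.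

-- ===== PORT A =====
-- fuel only makes the recursion total in Lean; inside Pre_ the fuel passed below is
-- proved sufficient, so the port computes exactly A's recursion.
def contarAux : Nat → Int → List Int → List Int → List (List Int) → Int
  | 0, _, _, _, _ => 0
  | fuel+1, valor, notas, atual, todas =>
    if valor = 0 then 1
    else if valor < 0 ∨ notas = [] then 0
    else match notas with
      | [] => 0
      | n :: t =>
        contarAux fuel (valor - n) (n :: t) (atual ++ [n]) todas
          + contarAux fuel valor t atual todas

def contar_combinacoes (valor : Int) (notas : List Int) (atual : List Int) (todas : List (List Int)) : Int :=
  contarAux (valor.toNat + notas.length + 1) valor notas atual todas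

-- ===== PORT B =====
-- frames are (remaining value, remaining notas, prefix extension); fuel bounds the
-- number of loop iterations (pops), proved sufficient inside Pre_.
def altLoop : Nat → List (Int × List Int × List Int) → List Int → List (List Int) → Int → Int
  | 0, _, _, _, count => count
  | _+1, [], _, _, count => count
  | fuel+1, (v, ns, ext) :: rest, atual, todas, count =>
    if v = 0 then altLoop fuel rest atual (todas ++ [atual ++ ext]) (count + 1)
    else if v < 0 ∨ ns = [] then altLoop fuel rest atual todas count
    else match ns with
      | [] => altLoop fuel rest atual todas count
      | n :: t => altLoop fuel ((v - n, n :: t, ext ++ [n]) :: (v, t, ext) :: rest) atual todas count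

def contar_combinacoes_alt (valor : Int) (notas : List Int) (atual : List Int) (todas : List (List Int)) : Int :=
  altLoop (2 ^ (valor.toNat + notas.length + 1)) [(valor, notas, [])] atual todas 0

-- ===== PRECONDITION & SPEC =====
-- Pre_ excludes exactly the inputs on which the Python A never returns (infinite
-- recursion ending in RecursionError): a positive valor together with some nota ≤ 0.
def Pre_contar_combinacoes (valor : Int) (notas : List Int) (atual : List Int) (todas : List (List Int)) : Prop :=
  0 < valor → ∀ n ∈ notas, 1 ≤ n
instance (valor : Int) (notas : List Int) (atual : List Int) (todas : List (List Int)) : Decidable (Pre_contar_combinacoes valor notas atual todas) := by unfold Pre_contar_combinacoes; infer_instance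

def pvWitness_contar_combinacoes : Int × List Int × List Int × List (List Int) := (11, [5, 2, 1], [], [])

def Spec_contar_combinacoes (valor : Int) (notas : List Int) (atual : List Int) (todas : List (List Int)) (out : Int) : Prop := out = contar_combinacoes_alt valor notas atual todas
instance (valor : Int) (notas : List Int) (atual : List Int) (todas : List (List Int)) (out : Int) : Decidable (Spec_contar_combinacoes valor notas atual todas out) := by unfold Spec_contar_combinacoes; infer_instance

-- ===== CLAIM (what is proved, stated in full; the proofs are below) =====
def Claim_equal_contar_combinacoes : Prop := ∀ (valor : Int) (notas : List Int) (atual : List Int) (todas : List (List Int)), Dom_contar_combinacoes valor notas atual todas → Pre_contar_combinacoes valor notas atual todas → Spec_contar_combinacoes valor notas atual todas (contar_combinacoes valor notas atual todas)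

-- ===== LEMMAS AND PROOFS =====

-- the recursion measure of a frame
def pvM (v : Int) (ns : List Int) : Nat := v.toNat + ns.length

-- contarAux is independent of fuel (above the measure), atual and todas
lemma contarAux_stable : ∀ (f f' : Nat) (v : Int) (ns a a' : List Int) (t t' : List (List Int)),
    (0 < v → ∀ n ∈ ns, 1 ≤ n) → pvM v ns < f → pvM v ns < f' →
    contarAux f v ns a t = contarAux f' v ns a' t' := by
  intro f
  induction f with
  | zero => intro f' v ns a a' t t' _ h; exact absurd h (by omega)
  | succ k ih =>
    intro f' v ns a a' t t' hpos hf hf'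
    cases f' with
    | zero => exact absurd hf' (by omega)
    | succ k' =>
      by_cases hv0 : v = 0
      · simp [contarAux, hv0]
      · by_cases hv : v < 0 ∨ ns = []
        · simp [contarAux, hv0, hv]
        · push_neg at hv
          obtain ⟨hvn, hne⟩ := hv
          cases ns with
          | nil => exact absurd rfl hne
          | cons n t0 =>
            have hvpos : 0 < v := by omega
            have hp := hpos hvpos
            have hn : 1 ≤ n := hp n (by simp)
            have hm1 : pvM (v - n) (n :: t0) < k := by
              simp [pvM] at hf ⊢; omega
            have hm2 : pvM v t0 < k := by
              simp [pvM] at hf ⊢; omega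
            have hm1' : pvM (v - n) (n :: t0) < k' := by
              simp [pvM] at hf' ⊢; omega
            have hm2' : pvM v t0 < k' := by
              simp [pvM] at hf' ⊢; omega
            have hpos1 : 0 < v - n → ∀ m ∈ (n :: t0), 1 ≤ m := fun _ => hp
            have hpos2 : 0 < v → ∀ m ∈ t0, 1 ≤ m := fun _ m hm => hp m (by simp [hm])
            simp only [contarAux, if_neg hv0, if_neg (by push_neg; exact ⟨hvn, hne⟩ :
              ¬(v < 0 ∨ (n :: t0 : List Int) = []))]
            rw [ih k' (v - n) (n :: t0) (a ++ [n]) (a' ++ [n]) t t' hpos1 hm1 hm1',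
                ih k' v t0 a a' t t' hpos2 hm2 hm2']

-- weight of a stack: an upper bound on the number of pops it causes
def pvW (stack : List (Int × List Int × List Int)) : Nat :=
  (stack.map (fun fr => 2 ^ (pvM fr.1 fr.2.1 + 1) - 1)).sum

-- the per-frame count the loop accumulates, expressed through port A's recursion
def pvC (stack : List (Int × List Int × List Int)) : Int :=
  (stack.map (fun fr => contarAux (pvM fr.1 fr.2.1 + 1) fr.1 fr.2.1 [] [])).sum

-- one unfolding step of port A's recursion in the branching case
lemma contarAux_branch (f : Nat) (v n : Int) (t0 a : List Int) (td : List (List Int))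
    (h0 : ¬ v = 0) (hn : ¬ v < 0) :
    contarAux (f + 1) v (n :: t0) a td
      = contarAux f (v - n) (n :: t0) (a ++ [n]) td + contarAux f v t0 a td := by
  simp only [contarAux, if_neg h0,
    if_neg (by simp only [not_or]; exact ⟨hn, by simp⟩ : ¬(v < 0 ∨ (n :: t0 : List Int) = []))]

lemma altLoop_eq : ∀ (F : Nat) (stack : List (Int × List Int × List Int))
    (atual : List Int) (todas : List (List Int)) (count : Int),
    (∀ fr ∈ stack, 0 < fr.1 → ∀ n ∈ fr.2.1, 1 ≤ n) →
    pvW stack ≤ F →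
    altLoop F stack atual todas count = count + pvC stack := by
  intro F
  induction F with
  | zero =>
    intro stack atual todas count _ hW
    cases stack with
    | nil => simp [altLoop, pvC]
    | cons fr rest =>
      exfalso
      have h1 : 2 ≤ 2 ^ (pvM fr.1 fr.2.1 + 1) := by
        calc 2 = 2 ^ 1 := by norm_num
        _ ≤ 2 ^ (pvM fr.1 fr.2.1 + 1) := Nat.pow_le_pow_right (by norm_num) (by omega)
      simp only [pvW, List.map_cons, List.sum_cons] at hW
      omega
  | succ k ih =>
    intro stack atual todas count hpos hW
    cases stack with
    | nil => simp [altLoop, pvC]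
    | cons fr rest =>
      obtain ⟨v, ns, ext⟩ := fr
      have hposr : ∀ fr ∈ rest, 0 < fr.1 → ∀ n ∈ fr.2.1, 1 ≤ n :=
        fun fr h => hpos fr (by simp [h])
      have hWhead : 2 ≤ 2 ^ (pvM v ns + 1) := by
        calc 2 = 2 ^ 1 := by norm_num
        _ ≤ 2 ^ (pvM v ns + 1) := Nat.pow_le_pow_right (by norm_num) (by omega)
      have hWrest : pvW rest ≤ k := by
        simp only [pvW, List.map_cons, List.sum_cons] at hW
        simp only [pvW]; omega
      by_cases hv0 : v = 0
      · have hc : contarAux (pvM v ns + 1) v ns [] [] = 1 := by simp [contarAux, hv0]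
        simp only [altLoop, if_pos hv0]
        rw [ih rest atual (todas ++ [atual ++ ext]) (count + 1) hposr hWrest]
        simp only [pvC, List.map_cons, List.sum_cons]
        rw [hc]; ring
      · by_cases hv : v < 0 ∨ ns = []
        · have hc : contarAux (pvM v ns + 1) v ns [] [] = 0 := by
            simp [contarAux, hv0, hv]
          simp only [altLoop, if_neg hv0, if_pos hv]
          rw [ih rest atual todas count hposr hWrest]
          simp only [pvC, List.map_cons, List.sum_cons]
          rw [hc]; ring
        · push_neg at hv
          obtain ⟨hvn, hne⟩ := hv
          cases ns with
          | nil => exact absurd rfl hne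
          | cons n t0 =>
            have hvpos : 0 < v := by omega
            have hp : ∀ m ∈ (n :: t0 : List Int), 1 ≤ m :=
              hpos (v, n :: t0, ext) (by simp) hvpos
            have hn : 1 ≤ n := hp n (by simp)
            have hm1 : pvM (v - n) (n :: t0) < pvM v (n :: t0) := by
              simp only [pvM, List.length_cons]; omega
            have hm2 : pvM v t0 < pvM v (n :: t0) := by
              simp only [pvM, List.length_cons]; omega
            have hWnew : pvW ((v - n, n :: t0, ext ++ [n]) :: (v, t0, ext) :: rest) ≤ k := by
              have e1 : 2 ^ (pvM (v - n) (n :: t0) + 1) * 2 ≤ 2 ^ (pvM v (n :: t0) + 1) := by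
                calc 2 ^ (pvM (v - n) (n :: t0) + 1) * 2 = 2 ^ (pvM (v - n) (n :: t0) + 1 + 1) := by ring
                _ ≤ 2 ^ (pvM v (n :: t0) + 1) := Nat.pow_le_pow_right (by norm_num) (by omega)
              have e2 : 2 ^ (pvM v t0 + 1) * 2 ≤ 2 ^ (pvM v (n :: t0) + 1) := by
                calc 2 ^ (pvM v t0 + 1) * 2 = 2 ^ (pvM v t0 + 1 + 1) := by ring
                _ ≤ 2 ^ (pvM v (n :: t0) + 1) := Nat.pow_le_pow_right (by norm_num) (by omega)
              simp only [pvW, List.map_cons, List.sum_cons] at hW ⊢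
              omega
            have hposnew : ∀ fr ∈ ((v - n, n :: t0, ext ++ [n]) :: (v, t0, ext) :: rest),
                0 < fr.1 → ∀ m ∈ fr.2.1, 1 ≤ m := by
              intro fr hfr
              simp at hfr
              rcases hfr with h | h | h
              · subst h; exact fun _ => hp
              · subst h; exact fun _ m hm => hp m (by simp [hm])
              · exact hposr fr h
            simp only [altLoop, if_neg hv0,
              if_neg (by push_neg; exact ⟨hvn, hne⟩ : ¬(v < 0 ∨ (n :: t0 : List Int) = []))]
            rw [ih _ atual todas count hposnew hWnew]
            have hstep : contarAux (pvM v (n :: t0) + 1) v (n :: t0) [] []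
                = contarAux (pvM (v - n) (n :: t0) + 1) (v - n) (n :: t0) [] []
                  + contarAux (pvM v t0 + 1) v t0 [] [] := by
              rw [contarAux_branch (pvM v (n :: t0)) v n t0 [] [] hv0 (by omega)]
              rw [contarAux_stable (pvM v (n :: t0)) (pvM (v - n) (n :: t0) + 1)
                    (v - n) (n :: t0) ([] ++ [n]) [] [] [] (fun _ => hp) (by omega) (by omega),
                  contarAux_stable (pvM v (n :: t0)) (pvM v t0 + 1)
                    v t0 [] [] [] [] (fun _ m hm => hp m (by simp [hm])) (by omega) (by omega)]
            simp only [pvC, List.map_cons, List.sum_cons]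
            rw [hstep]; ring

-- ===== VERDICT (by name: the statement is the Claim_ definition above) =====
theorem contar_combinacoes_spec : Claim_equal_contar_combinacoes := by
  intro valor notas atual todas _ hpre
  unfold Spec_contar_combinacoes contar_combinacoes contar_combinacoes_alt
  have hW : pvW [(valor, notas, ([] : List Int))] ≤ 2 ^ (valor.toNat + notas.length + 1) := by
    simp only [pvW, pvM, List.map_cons, List.map_nil, List.sum_cons, List.sum_nil]
    have : 1 ≤ 2 ^ (valor.toNat + notas.length + 1) := Nat.one_le_two_pow
    omega
  rw [altLoop_eq _ _ _ _ _ (by intro fr hfr; simp at hfr; subst hfr; exact hpre) hW]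
  simp only [pvC, pvM, List.map_cons, List.map_nil, List.sum_cons, List.sum_nil]
  rw [contarAux_stable (valor.toNat + notas.length + 1) (valor.toNat + notas.length + 1)
        valor notas atual [] todas [] hpre (by simp only [pvM]; omega) (by simp only [pvM]; omega)]
  ring
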